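-- pv_equiv track=rewrite | github.com/nablarch/nabledge-dev | tools/rbkc/scripts/create/converters/xlsx_common.py | _looks_like_sub_header
-- ===== SOURCE A (Python) =====
-- def _looks_like_header_cell(v: str) -> bool:
--     """Heuristic mirror of ``scripts.verify.verify._looks_like_header_cell``.
--
--     A header cell is a short (≤ 40 chars), non-numeric label.  Applied
--     to reject data rows (numeric IDs, long prose) from being mis-picked
--     as header rows.
--     """
--     if not v:
--         return False
--     s = v.strip()
--     if not s or len(s) > 40:
--         return False
--     try:
--         float(s.replace(",", ""))
--         return False
--     except ValueError:
--         pass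
--     return True
--
-- def _looks_like_sub_header(row_h: list[str], row_h1: list[str]) -> bool:
--     """Spec §8-3 span-inherit parent/leaf detection (Phase 22-B-12).
--
--     Independently derived from the spec, identical semantics to the
--     verify-side helper.  A multi-row header is recognised iff some
--     parent cell genuinely spans ≥ 2 leaf cells (i.e. there is a parent
--     column p such that the leaf row has ≥ 2 non-empty cells in
--     [p, next_parent_column)).  Additionally:
--       - all non-empty leaf cells must look like header labels
--       - all non-empty parent cells must look like header labels (long
--         free-text cells are preamble, not parents)
--     """
--     h_non_empty_cols = [cx for cx, v in enumerate(row_h) if v]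
--     h1_non_empty_cols = [cx for cx, v in enumerate(row_h1) if v]
--     if not h_non_empty_cols or not h1_non_empty_cols:
--         return False
--     if not all(_looks_like_header_cell(row_h1[c]) for c in h1_non_empty_cols):
--         return False
--     if not all(_looks_like_header_cell(row_h[c]) for c in h_non_empty_cols):
--         return False
--     h1_col_set = set(h1_non_empty_cols)
--     max_c = max(len(row_h), len(row_h1))
--     for i, p_col in enumerate(h_non_empty_cols):
--         next_p = h_non_empty_cols[i + 1] if i + 1 < len(h_non_empty_cols) else max_c
--         leaf_in_span = sum(1 for lc in h1_col_set if p_col <= lc < next_p)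
--         if leaf_in_span >= 2:
--             return True
--     return False
-- ===== SOURCE B (Python) =====
-- def _looks_like_header_cell(v: str) -> bool:
--     if not v:
--         return False
--     s = v.strip()
--     if not s or len(s) > 40:
--         return False
--     try:
--         float(s.replace(",", ""))
--         return False
--     except ValueError:
--         pass
--     return True
--
--
-- def _looks_like_sub_header(row_h: list[str], row_h1: list[str]) -> bool:
--     # Single fused left-to-right sweep over the columns: no filtered column
--     # lists, no set, no per-parent inner scan.  One pass maintains
--     #   has_p / has_l : a non-empty parent / leaf cell was seen
--     #   ok           : every non-empty cell seen so far looks like a header label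
--     #   cnt          : leaves counted in the currently open parent span
--     #   found        : some closed span contained >= 2 leaves
--     # O(C) over the C columns instead of A's O(P*L) parent-by-parent counting.
--     max_c = max(len(row_h), len(row_h1))
--     has_p = False
--     has_l = False
--     ok = True
--     found = False
--     cnt = 0
--     for c in range(max_c):
--         p = row_h[c] if c < len(row_h) else ""
--         l = row_h1[c] if c < len(row_h1) else ""
--         if p:
--             if has_p and cnt >= 2:
--                 found = True
--             has_p = True
--             ok = ok and _looks_like_header_cell(p)
--             cnt = 0
--         if l:
--             has_l = True
--             ok = ok and _looks_like_header_cell(l)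
--             if has_p:
--                 cnt += 1
--     if has_p and cnt >= 2:
--         found = True
--     return has_p and has_l and ok and found
-- ===== Notes on version B (the rewrite author's own statement) =====
-- stated objective: faster
-- what changed: A stages the work (filter parent columns, filter leaf columns, validity passes over each, build a set, then for every parent rescan the whole leaf-column set); B is one fused left-to-right sweep over the padded columns that maintains has-parent/has-leaf flags, an all-cells-valid flag and a leaf counter per open parent span, closing a span whenever the next parent appears.
import Mathlib
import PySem

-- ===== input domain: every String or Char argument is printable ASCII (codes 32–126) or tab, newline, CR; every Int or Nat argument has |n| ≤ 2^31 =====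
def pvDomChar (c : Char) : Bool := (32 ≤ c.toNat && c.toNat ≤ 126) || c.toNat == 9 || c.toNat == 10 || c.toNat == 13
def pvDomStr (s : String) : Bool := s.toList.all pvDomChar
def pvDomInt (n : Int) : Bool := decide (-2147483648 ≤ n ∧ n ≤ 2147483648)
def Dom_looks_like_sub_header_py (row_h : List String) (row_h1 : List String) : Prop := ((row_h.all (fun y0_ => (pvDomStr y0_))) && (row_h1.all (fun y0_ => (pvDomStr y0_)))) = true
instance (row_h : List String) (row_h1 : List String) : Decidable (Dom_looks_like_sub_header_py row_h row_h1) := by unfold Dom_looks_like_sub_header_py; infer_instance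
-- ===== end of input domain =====

-- B replaces A's staged passes (filter parent/leaf columns, set build, per-parent
-- scan of the leaf set) by ONE fused left-to-right sweep over the columns that
-- maintains flags and a per-span leaf counter (objective: faster, O(C) vs O(P*L)).

-- ===== PORT A =====

-- Hand port of the acceptance test of Python's `float(s)` (exact on the ASCII
-- domain): a digit run may contain single underscores between digits.
-- pvDigits cs = (number of digits consumed, rest); pvDigits1 is the state
-- "previous char was a digit" (so an underscore is allowed before a digit).
def pvDigits1 : List Char → Nat × List Char
  | [] => (0, [])
  | c :: rest =>
    if PySem.Chars.isdigit c then
      let (n, r) := pvDigits1 rest; (n + 1, r)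
    else if c == '_' then
      match rest with
      | d :: rest2 =>
        if PySem.Chars.isdigit d then
          let (n, r) := pvDigits1 rest2; (n + 1, r)
        else (0, c :: rest)
      | [] => (0, [c])
    else (0, c :: rest)

def pvDigits : List Char → Nat × List Char
  | [] => (0, [])
  | c :: rest =>
    if PySem.Chars.isdigit c then
      let (n, r) := pvDigits1 rest; (n + 1, r)
    else (0, c :: rest)

-- optional exponent part 'e[±]digits' followed by end of string
def pvExpPart (cs : List Char) : Bool :=
  match cs with
  | [] => true
  | c :: rest =>
    if c == 'e' || c == 'E' then
      let rest2 := match rest with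
        | s :: r => if s == '+' || s == '-' then r else s :: r
        | [] => []
      let (n, r) := pvDigits rest2
      decide (1 ≤ n) && r.isEmpty
    else false

-- unsigned float literal: digits [. digits] [exp]  with ≥ 1 mantissa digit
def pvUnsignedFloat (cs : List Char) : Bool :=
  let (n1, r1) := pvDigits cs
  match r1 with
  | '.' :: rest =>
    let (n2, r2) := pvDigits rest
    if n1 + n2 == 0 then false else pvExpPart r2
  | _ => if n1 == 0 then false else pvExpPart r1

-- does `float(s)` succeed? (CPython: strip whitespace, optional sign, then
-- inf/infinity/nan case-insensitively or an unsigned float literal)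
def pvFloatAccepts (s : String) : Bool :=
  let cs0 := (((s.toList.dropWhile PySem.Chars.isspace).reverse.dropWhile PySem.Chars.isspace).reverse)
  let cs := match cs0 with
    | c :: rest => if c == '+' || c == '-' then rest else c :: rest
    | [] => []
  let low := cs.map PySem.Chars.lowerChar
  if low == "inf".toList || low == "infinity".toList || low == "nan".toList then true
  else pvUnsignedFloat cs

-- port of _looks_like_header_cell (shared module helper, used by both A and B)
def pvHeaderCell (v : String) : Bool :=
  if v == "" then false
  else
    let s := PySem.Str.strip v
    if s == "" || decide (40 < PySem.Str.len s) then false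
    else if pvFloatAccepts (PySem.Str.replace s "," "") then false
    else true

-- A's for-loop over parent columns: next parent = head of the rest (or max_c);
-- `sum(1 for lc in h1_col_set if p <= lc < next_p)` is a 0/1-sum = countP over
-- the set's elements (order-independent).
def pvLoopA (ps : List Int) (h1set : PySem.Set Int) (maxc : Int) : Bool :=
  match ps with
  | [] => false
  | p :: rest =>
    let nextp : Int := match rest with | [] => maxc | q :: _ => q
    let cnt := h1set.countP (fun lc => decide (p ≤ lc ∧ lc < nextp))
    if 2 ≤ cnt then true else pvLoopA rest h1set maxc

def looks_like_sub_header_py (row_h : List String) (row_h1 : List String) : Bool :=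
  let hcols := ((PySem.List.enumerate row_h).filter (fun cv => !(cv.2 == ""))).map (·.1)
  let h1cols := ((PySem.List.enumerate row_h1).filter (fun cv => !(cv.2 == ""))).map (·.1)
  if hcols.isEmpty || h1cols.isEmpty then false
  -- row_h1[c] / row_h[c]: the index is always in range (it comes from enumerate)
  else if !(h1cols.all fun c => (PySem.List.pyGet? row_h1 c).elim false pvHeaderCell) then false
  else if !(hcols.all fun c => (PySem.List.pyGet? row_h c).elim false pvHeaderCell) then false
  else
    let h1set : PySem.Set Int := PySem.Set.ofList h1cols
    let maxc : Int := max (row_h.length : Int) (row_h1.length : Int)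
    pvLoopA hcols h1set maxc

-- ===== PORT B =====

-- `row[c] if c < len(row) else ""` — the padded cell access of Source B's loop body
def pvCell (row : List String) (c : Int) : String :=
  if c < (row.length : Int) then PySem.List.pyGetD row c "" else ""

-- state (has_p, has_l, ok, found, cnt); one body of Source B's for-loop
def pvStepB (row_h : List String) (row_h1 : List String)
    (st : Bool × Bool × Bool × Bool × Int) (c : Int) : Bool × Bool × Bool × Bool × Int :=
  match st with
  | (hp, hl, ok, fd, cnt) =>
    let p := pvCell row_h c
    let l := pvCell row_h1 c
    match (if !(p == "") then
            (true, hl, ok && pvHeaderCell p, fd || (hp && decide (2 ≤ cnt)), (0 : Int))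
          else (hp, hl, ok, fd, cnt)) with
    | (hp1, hl1, ok1, fd1, cnt1) =>
      if !(l == "") then
        (hp1, true, ok1 && pvHeaderCell l, fd1, cnt1 + (if hp1 then 1 else 0))
      else (hp1, hl1, ok1, fd1, cnt1)

def looks_like_sub_header_py_alt (row_h : List String) (row_h1 : List String) : Bool :=
  let maxc : Int := max (row_h.length : Int) (row_h1.length : Int)
  match (PySem.List.pyRange 0 maxc).foldl (pvStepB row_h row_h1) (false, false, true, false, (0 : Int)) with
  | (hp, hl, ok, fd, cnt) => hp && hl && ok && (fd || (hp && decide (2 ≤ cnt)))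

-- ===== PRECONDITION & SPEC =====
def Spec_looks_like_sub_header_py (row_h : List String) (row_h1 : List String) (out : Bool) : Prop := out = looks_like_sub_header_py_alt row_h row_h1
instance (row_h : List String) (row_h1 : List String) (out : Bool) : Decidable (Spec_looks_like_sub_header_py row_h row_h1 out) := by unfold Spec_looks_like_sub_header_py; infer_instance

-- ===== CLAIM (what is proved, stated in full; the proofs are below) =====
def Claim_equal_looks_like_sub_header_py : Prop := ∀ (row_h : List String) (row_h1 : List String), Dom_looks_like_sub_header_py row_h row_h1 → Spec_looks_like_sub_header_py row_h row_h1 (looks_like_sub_header_py row_h row_h1)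

-- ===== LEMMAS AND PROOFS =====

-- "column c holds a non-empty (padded) cell" — the proof's view of Source B's truth tests
def pvNE (row : List String) (c : Int) : Bool := !(pvCell row c == "")

-- per-column validity: every non-empty cell of either row looks like a header label
def pvOkC (row_h : List String) (row_h1 : List String) (c : Int) : Bool :=
  (!(pvNE row_h c) || pvHeaderCell (pvCell row_h c)) &&
  (!(pvNE row_h1 c) || pvHeaderCell (pvCell row_h1 c))

lemma pv_all_congr {α : Type} (l : List α) (f g : α → Bool)
    (h : ∀ x ∈ l, f x = g x) : l.all f = l.all g := by
  induction l with
  | nil => rfl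
  | cons a t ih => simp_all [List.all_cons]

lemma pv_any_filter_empty {α : Type} (l : List α) (p : α → Bool) :
    l.any p = !(l.filter p).isEmpty := by
  induction l with
  | nil => rfl
  | cons a t ih => by_cases h : p a <;> simp [h, ih]

lemma pv_all_and {α : Type} (l : List α) (p q : α → Bool) :
    (l.all fun x => p x && q x) = (l.all p && l.all q) := by
  induction l with
  | nil => rfl
  | cons a t ih =>
    simp only [List.all_cons, ih]
    cases p a <;> cases q a <;> simp

-- set(xs) on a duplicate-free list is xs itself
lemma pv_ofList_nodup {l : List Int} (h : l.Nodup) : PySem.Set.ofList l = l := by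
  have main : ∀ (xs acc : List Int), (acc ++ xs).Nodup →
      xs.foldl PySem.Set.add acc = acc ++ xs := by
    intro xs
    induction xs with
    | nil => intro acc _; simp
    | cons x t ih =>
      intro acc hnd
      have hx : x ∉ acc := by
        intro hmem
        exact (List.disjoint_of_nodup_append hnd) hmem List.mem_cons_self
      have hadd : PySem.Set.add acc x = acc ++ [x] := by
        simp [PySem.Set.add, PySem.Set.contains]
        intro hc
        exact absurd hc hx
      rw [List.foldl_cons, hadd, ih (acc ++ [x]) (by simpa using hnd)]
      simp
  have := main l [] (by simpa using h)
  simpa [PySem.Set.ofList_eq_foldl] using this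

-- beyond the row, the padded cell is empty
lemma pvNE_ge (row : List String) (c : Int) (h : (row.length : Int) ≤ c) :
    pvNE row c = false := by
  simp [pvNE, pvCell]
  omega

-- inside the row, the padded cell is the real cell
lemma pvCell_lt (row : List String) (c : Int) (_h0 : 0 ≤ c) (h : c < (row.length : Int)) :
    pvCell row c = PySem.List.pyGetD row c "" := by
  simp [pvCell, h]

-- A's enumerate-filter-map column list, as a filtered column range (any m ≥ len)
lemma pvColsRange (row : List String) (m : Int) (hm : (row.length : Int) ≤ m) :
    (((PySem.List.enumerate row).filter (fun cv => !(cv.2 == ""))).map (·.1))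
      = (PySem.List.pyRange 0 m).filter (pvNE row) := by
  rw [PySem.List.enumerate_eq_map_pyRange row "", List.filter_map, List.map_map]
  have h1 : (PySem.List.pyRange 0 m).filter (pvNE row)
      = (PySem.List.pyRange 0 (PySem.List.len row)).filter (pvNE row) := by
    rw [PySem.List.pyRange_one_append 0 (PySem.List.len row) m (by simp) (by simpa using hm),
      List.filter_append]
    have hnil : (PySem.List.pyRange (PySem.List.len row) m).filter (pvNE row) = [] := by
      apply List.filter_eq_nil_iff.mpr
      intro c hc
      rw [PySem.List.mem_pyRange_one] at hc
      rw [pvNE_ge row c (by simpa using hc.1)]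
      simp
    rw [hnil, List.append_nil]
  rw [h1]
  have h2 : (PySem.List.pyRange 0 (PySem.List.len row)).filter (pvNE row)
      = (PySem.List.pyRange 0 (PySem.List.len row)).filter
          ((fun cv => !(cv.2 == "")) ∘ fun j => (j, PySem.List.pyGetD row j "")) := by
    apply List.filter_congr
    intro c hc
    rw [PySem.List.mem_pyRange_one] at hc
    simp [pvNE, pvCell_lt row c hc.1 (by simpa using hc.2)]
  rw [h2]
  rw [show ((fun x : Int × String => x.1) ∘ fun j : Int => (j, PySem.List.pyGetD row j ""))
      = (fun j : Int => j) from rfl, List.map_id_fun']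
  rfl

lemma pvAllRange (row : List String) (m : Int) :
    (((PySem.List.pyRange 0 m).filter (pvNE row)).all
        fun c => (PySem.List.pyGet? row c).elim false pvHeaderCell)
      = ((PySem.List.pyRange 0 m).filter (pvNE row)).all
          (fun c => pvHeaderCell (pvCell row c)) := by
  apply pv_all_congr
  intro c hc
  have hmem := List.mem_of_mem_filter hc
  have hp := List.of_mem_filter hc
  rw [PySem.List.mem_pyRange_one] at hmem
  have hlt : c < (row.length : Int) := by
    by_contra h
    rw [pvNE_ge row c (by omega)] at hp
    exact absurd hp (by simp)
  obtain ⟨k, rfl⟩ := Int.eq_ofNat_of_zero_le hmem.1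
  have hk : k < row.length := by exact_mod_cast hlt
  rw [PySem.List.pyGet?_natCast]
  simp [hk, pvCell, hlt, PySem.List.pyGetD_natCast, List.getD_eq_getElem?_getD]

-- the leaf count of the span [p, q) over the full leaf-column set is the leaf
-- count of the column range [p, q)
lemma pvCountSet (row_h1 : List String) (maxc p q : Int)
    (h0 : 0 ≤ p) (hpq : p ≤ q) (hq : q ≤ maxc) :
    ((PySem.List.pyRange 0 maxc).filter (pvNE row_h1)).countP
        (fun lc => decide (p ≤ lc ∧ lc < q))
      = (PySem.List.pyRange p q).countP (pvNE row_h1) := by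
  rw [List.countP_filter]
  rw [PySem.List.pyRange_one_append 0 p maxc h0 (by omega),
    PySem.List.pyRange_one_append p q maxc hpq hq,
    List.countP_append, List.countP_append]
  have hA : (PySem.List.pyRange 0 p).countP
      (fun a => decide (p ≤ a ∧ a < q) && pvNE row_h1 a) = 0 := by
    rw [List.countP_eq_zero]
    intro a ha
    rw [PySem.List.mem_pyRange_one] at ha
    simp only [Bool.and_eq_true, decide_eq_true_eq]
    rintro ⟨⟨h1, _⟩, _⟩; omega
  have hC : (PySem.List.pyRange q maxc).countP
      (fun a => decide (p ≤ a ∧ a < q) && pvNE row_h1 a) = 0 := by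
    rw [List.countP_eq_zero]
    intro a ha
    rw [PySem.List.mem_pyRange_one] at ha
    simp only [Bool.and_eq_true, decide_eq_true_eq]
    rintro ⟨⟨_, h2⟩, _⟩; omega
  have hB : (PySem.List.pyRange p q).countP
      (fun a => decide (p ≤ a ∧ a < q) && pvNE row_h1 a)
      = (PySem.List.pyRange p q).countP (pvNE row_h1) := by
    apply List.countP_congr
    intro a ha
    rw [PySem.List.mem_pyRange_one] at ha
    simp [ha.1, ha.2]
  omega

-- Source B's loop over a parent-free column block [a, b): has_p/found frozen, the
-- flags and the counter accumulate
lemma pvNoParAux (n : Nat) (row_h row_h1 : List String) :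
    ∀ (a b : Int), (b - a).toNat = n →
    (∀ c, a ≤ c → c < b → pvNE row_h c = false) →
    ∀ (hp hl ok fd : Bool) (cnt : Int),
    (PySem.List.pyRange a b).foldl (pvStepB row_h row_h1) (hp, hl, ok, fd, cnt)
      = (hp,
         hl || (PySem.List.pyRange a b).any (pvNE row_h1),
         ok && (PySem.List.pyRange a b).all (pvOkC row_h row_h1),
         fd,
         cnt + (if hp then ((PySem.List.pyRange a b).countP (pvNE row_h1) : Int) else 0)) := by
  induction n with
  | zero =>
    intro a b hn _ hp hl ok fd cnt
    have hba : b ≤ a := by omega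
    rw [PySem.List.pyRange_one_eq_nil hba]
    simp
  | succ n ih =>
    intro a b hn hnp hp hl ok fd cnt
    have hab : a < b := by omega
    rw [PySem.List.pyRange_one_cons hab]
    rw [List.foldl_cons, List.any_cons, List.all_cons, List.countP_cons]
    have hP : pvNE row_h a = false := hnp a le_rfl hab
    have hstep : pvStepB row_h row_h1 (hp, hl, ok, fd, cnt) a
        = (hp, hl || pvNE row_h1 a,
           ok && (!(pvNE row_h1 a) || pvHeaderCell (pvCell row_h1 a)),
           fd, cnt + (if hp then (if pvNE row_h1 a then 1 else 0) else 0)) := by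
      simp only [pvStepB]
      rw [show (!(pvCell row_h a == "")) = pvNE row_h a from rfl, hP]
      simp only [Bool.false_eq_true, if_false]
      rw [show (!(pvCell row_h1 a == "")) = pvNE row_h1 a from rfl]
      by_cases hL : pvNE row_h1 a = true
      · rw [hL]; cases hp <;> simp
      · rw [Bool.not_eq_true] at hL
        rw [hL]; cases hp <;> simp
    rw [hstep, ih (a + 1) b (by omega) (fun c h1 h2 => hnp c (by omega) h2)]
    have hok : pvOkC row_h row_h1 a
        = (!(pvNE row_h1 a) || pvHeaderCell (pvCell row_h1 a)) := by
      simp [pvOkC, hP]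
    rw [hok]
    simp only [Prod.mk.injEq]
    refine ⟨trivial, Bool.or_assoc _ _ _, Bool.and_assoc _ _ _, trivial, ?_⟩
    cases hp <;> by_cases hL : pvNE row_h1 a = true <;> simp [hL] <;> omega

lemma pvNoPar (row_h row_h1 : List String) (a b : Int)
    (hnp : ∀ c, a ≤ c → c < b → pvNE row_h c = false)
    (hp hl ok fd : Bool) (cnt : Int) :
    (PySem.List.pyRange a b).foldl (pvStepB row_h row_h1) (hp, hl, ok, fd, cnt)
      = (hp,
         hl || (PySem.List.pyRange a b).any (pvNE row_h1),
         ok && (PySem.List.pyRange a b).all (pvOkC row_h row_h1),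
         fd,
         cnt + (if hp then ((PySem.List.pyRange a b).countP (pvNE row_h1) : Int) else 0)) :=
  pvNoParAux (b - a).toNat row_h row_h1 a b rfl hnp hp hl ok fd cnt

-- the head of a filtered column range: the first matching column, nothing
-- matching before it, and the tail is the filter of the rest
lemma pvFilterSplitAux (n : Nat) (P : Int → Bool) :
    ∀ (a b p : Int) (rest : List Int), (b - a).toNat = n →
    (PySem.List.pyRange a b).filter P = p :: rest →
    a ≤ p ∧ p < b ∧ P p = true ∧ (∀ c, a ≤ c → c < p → P c = false) ∧
      (PySem.List.pyRange (p + 1) b).filter P = rest := by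
  induction n with
  | zero =>
    intro a b p rest hn h
    rw [PySem.List.pyRange_one_eq_nil (by omega)] at h
    simp at h
  | succ n ih =>
    intro a b p rest hn h
    have hab : a < b := by omega
    rw [PySem.List.pyRange_one_cons hab, List.filter_cons] at h
    by_cases hPa : P a = true
    · rw [if_pos hPa] at h
      obtain ⟨rfl, rfl⟩ : a = p ∧ (PySem.List.pyRange (a + 1) b).filter P = rest := by
        cases h; exact ⟨rfl, rfl⟩
      exact ⟨le_rfl, hab, hPa, fun c h1 h2 => absurd (by omega : a < a) (by omega), rfl⟩
    · rw [if_neg hPa] at h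
      obtain ⟨h1, h2, h3, h4, h5⟩ := ih (a + 1) b p rest (by omega) h
      refine ⟨by omega, h2, h3, ?_, h5⟩
      intro c hc1 hc2
      by_cases hca : c = a
      · subst hca; simpa using hPa
      · exact h4 c (by omega) hc2

-- the main span correspondence: after a parent at column `lastp` (all columns of
-- (lastp, a) already folded into the counter), the rest of Source B's sweep agrees
-- with A's remaining parent loop
lemma pvMain (row_h row_h1 : List String) (maxc : Int) (ps : List Int) :
    ∀ (lastp a : Int) (hl ok fd : Bool),
    0 ≤ lastp → lastp < a → a ≤ maxc →
    (PySem.List.pyRange a maxc).filter (pvNE row_h) = ps →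
    ∃ fd' cnt',
      (PySem.List.pyRange a maxc).foldl (pvStepB row_h row_h1)
          (true, hl, ok, fd, ((PySem.List.pyRange lastp a).countP (pvNE row_h1) : Int))
        = (true,
           hl || (PySem.List.pyRange a maxc).any (pvNE row_h1),
           ok && (PySem.List.pyRange a maxc).all (pvOkC row_h row_h1),
           fd', cnt')
      ∧ (fd' || decide (2 ≤ cnt'))
          = (fd || pvLoopA (lastp :: ps)
              ((PySem.List.pyRange 0 maxc).filter (pvNE row_h1)) maxc) := by
  induction ps with
  | nil =>
    intro lastp a hl ok fd h0 hla ham hfil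
    rw [List.filter_eq_nil_iff] at hfil
    have hnp : ∀ c, a ≤ c → c < maxc → pvNE row_h c = false := by
      intro c h1 h2
      simpa using hfil c (by rw [PySem.List.mem_pyRange_one]; omega)
    refine ⟨fd, _, pvNoPar row_h row_h1 a maxc hnp true hl ok fd _, ?_⟩
    simp only [if_true]
    have hcnt : ((PySem.List.pyRange lastp a).countP (pvNE row_h1) : Int)
        + ((PySem.List.pyRange a maxc).countP (pvNE row_h1) : Int)
        = ((PySem.List.pyRange lastp maxc).countP (pvNE row_h1) : Int) := by
      rw [PySem.List.pyRange_one_append lastp a maxc (by omega) (by omega), List.countP_append]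
      push_cast; ring
    rw [hcnt]
    simp only [pvLoopA]
    rw [pvCountSet row_h1 maxc lastp maxc h0 (by omega) le_rfl]
    by_cases h2 : 2 ≤ (PySem.List.pyRange lastp maxc).countP (pvNE row_h1)
    · rw [if_pos h2]
      simp [h2]
    · rw [if_neg h2]
      simp [h2]
  | cons p rest ih =>
    intro lastp a hl ok fd h0 hla ham hfil
    obtain ⟨hap, hpm, hPp, hnp, hrest⟩ :=
      pvFilterSplitAux (maxc - a).toNat (pvNE row_h) a maxc p rest rfl hfil
    -- split the sweep at the parent column p
    rw [PySem.List.pyRange_one_append a p maxc hap (by omega),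
      PySem.List.pyRange_one_cons hpm]
    rw [List.foldl_append, List.foldl_cons, List.any_append, List.any_cons,
      List.all_append, List.all_cons]
    rw [pvNoPar row_h row_h1 a p hnp true hl ok fd _]
    simp only [if_true]
    have hcnt : ((PySem.List.pyRange lastp a).countP (pvNE row_h1) : Int)
        + ((PySem.List.pyRange a p).countP (pvNE row_h1) : Int)
        = ((PySem.List.pyRange lastp p).countP (pvNE row_h1) : Int) := by
      rw [PySem.List.pyRange_one_append lastp a p (by omega) (by omega), List.countP_append]
      push_cast; ring
    rw [hcnt]
    -- the step at the parent column p
    set hl1 := hl || (PySem.List.pyRange a p).any (pvNE row_h1) with hhl1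
    set ok1 := ok && (PySem.List.pyRange a p).all (pvOkC row_h row_h1) with hok1
    set fd1 := fd || decide (2 ≤ ((PySem.List.pyRange lastp p).countP (pvNE row_h1) : Int)) with hfd1
    have hstep : pvStepB row_h row_h1
        (true, hl1, ok1, fd, ((PySem.List.pyRange lastp p).countP (pvNE row_h1) : Int)) p
        = (true, hl1 || pvNE row_h1 p,
           (ok1 && pvHeaderCell (pvCell row_h p)) && (!(pvNE row_h1 p) || pvHeaderCell (pvCell row_h1 p)),
           fd1,
           ((PySem.List.pyRange p (p + 1)).countP (pvNE row_h1) : Int)) := by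
      simp only [pvStepB]
      rw [show (!(pvCell row_h p == "")) = pvNE row_h p from rfl, hPp]
      simp only [if_true]
      rw [show (!(pvCell row_h1 p == "")) = pvNE row_h1 p from rfl]
      rw [PySem.List.pyRange_one_singleton, List.countP_cons, List.countP_nil]
      by_cases hL : pvNE row_h1 p = true
      · rw [hL]; simp [hfd1]
      · rw [Bool.not_eq_true] at hL
        rw [hL]; simp [hfd1]
    rw [hstep]
    obtain ⟨fd', cnt', hfold, hcomb⟩ :=
      ih p (p + 1) (hl1 || pvNE row_h1 p)
        ((ok1 && pvHeaderCell (pvCell row_h p)) && (!(pvNE row_h1 p) || pvHeaderCell (pvCell row_h1 p)))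
        fd1 (by omega) (by omega) (by omega) hrest
    rw [hfold]
    refine ⟨fd', cnt', ?_, ?_⟩
    · -- reassemble the hl and ok components
      have hokp : pvOkC row_h row_h1 p
          = (pvHeaderCell (pvCell row_h p) && (!(pvNE row_h1 p) || pvHeaderCell (pvCell row_h1 p))) := by
        simp [pvOkC, hPp]
      rw [hokp, hhl1, hok1]
      simp [Bool.or_assoc, Bool.and_assoc]
    · rw [hcomb, hfd1]
      simp only [pvLoopA]
      rw [pvCountSet row_h1 maxc lastp p h0 (by omega) (by omega)]
      by_cases h2 : 2 ≤ (PySem.List.pyRange lastp p).countP (pvNE row_h1)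
      · rw [if_pos h2]
        simp [h2]
      · rw [if_neg h2]
        simp [h2]

-- the common canonical value both programs compute: non-empty parent and leaf
-- column sets, all-cells-valid, and A's span loop over the filtered column ranges
def pvCanon (row_h : List String) (row_h1 : List String) : Bool :=
  let maxc : Int := max (row_h.length : Int) (row_h1.length : Int)
  let ps := (PySem.List.pyRange 0 maxc).filter (pvNE row_h)
  let ls := (PySem.List.pyRange 0 maxc).filter (pvNE row_h1)
  !ps.isEmpty && !ls.isEmpty &&
    (PySem.List.pyRange 0 maxc).all (pvOkC row_h row_h1) && pvLoopA ps ls maxc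

lemma pvA_eq_canon (row_h : List String) (row_h1 : List String) :
    looks_like_sub_header_py row_h row_h1 = pvCanon row_h row_h1 := by
  unfold looks_like_sub_header_py pvCanon
  set maxc : Int := max (row_h.length : Int) (row_h1.length : Int) with hmax
  have hH : (row_h.length : Int) ≤ maxc := le_max_left _ _
  have hL : (row_h1.length : Int) ≤ maxc := le_max_right _ _
  rw [pvColsRange row_h maxc hH, pvColsRange row_h1 maxc hL]
  simp only []
  rw [pvAllRange row_h maxc, pvAllRange row_h1 maxc]
  have hnodup : ((PySem.List.pyRange 0 maxc).filter (pvNE row_h1)).Nodup :=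
    (PySem.List.nodup_pyRange_one 0 maxc).filter _
  rw [pv_ofList_nodup hnodup]
  rw [List.all_filter, List.all_filter]
  have hsplit : (PySem.List.pyRange 0 maxc).all (pvOkC row_h row_h1)
      = (((PySem.List.pyRange 0 maxc).all
            (fun c => !(pvNE row_h c) || pvHeaderCell (pvCell row_h c)))
          && ((PySem.List.pyRange 0 maxc).all
            (fun c => !(pvNE row_h1 c) || pvHeaderCell (pvCell row_h1 c)))) := by
    rw [← pv_all_and]
    apply pv_all_congr
    intro c _
    rfl
  rw [hsplit]
  cases hE1 : ((PySem.List.pyRange 0 maxc).filter (pvNE row_h)).isEmpty <;>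
    cases hE2 : ((PySem.List.pyRange 0 maxc).filter (pvNE row_h1)).isEmpty <;>
      cases hA1 : (PySem.List.pyRange 0 maxc).all
          (fun c => !(pvNE row_h c) || pvHeaderCell (pvCell row_h c)) <;>
        cases hA2 : (PySem.List.pyRange 0 maxc).all
            (fun c => !(pvNE row_h1 c) || pvHeaderCell (pvCell row_h1 c)) <;>
          simp

lemma pvB_eq_canon (row_h : List String) (row_h1 : List String) :
    looks_like_sub_header_py_alt row_h row_h1 = pvCanon row_h row_h1 := by
  unfold looks_like_sub_header_py_alt pvCanon
  set maxc : Int := max (row_h.length : Int) (row_h1.length : Int) with hmax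
  simp only []
  have h0m : (0 : Int) ≤ maxc := le_trans (by positivity) (le_max_left _ _)
  cases hps : (PySem.List.pyRange 0 maxc).filter (pvNE row_h) with
  | nil =>
    -- no parent column anywhere: B's sweep never sets has_p, and the canonical
    -- value is false since ps is empty
    rw [List.filter_eq_nil_iff] at hps
    have hnp : ∀ c, (0 : Int) ≤ c → c < maxc → pvNE row_h c = false := by
      intro c h1 h2
      simpa using hps c (by rw [PySem.List.mem_pyRange_one]; omega)
    rw [pvNoPar row_h row_h1 0 maxc hnp false false true false 0]
    simp
  | cons p rest =>
    obtain ⟨hap, hpm, hPp, hnp, hrest⟩ :=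
      pvFilterSplitAux (maxc - 0).toNat (pvNE row_h) 0 maxc p rest rfl hps
    -- B's fold, split at the first parent column p
    obtain ⟨fd', cnt', hfold, hcomb⟩ :=
      pvMain row_h row_h1 maxc rest p (p + 1)
        ((PySem.List.pyRange 0 p).any (pvNE row_h1) || pvNE row_h1 p)
        (((PySem.List.pyRange 0 p).all (pvOkC row_h row_h1) && pvHeaderCell (pvCell row_h p))
          && (!(pvNE row_h1 p) || pvHeaderCell (pvCell row_h1 p)))
        false (by omega) (by omega) (by omega) hrest
    have hstep : pvStepB row_h row_h1
        (false, (PySem.List.pyRange 0 p).any (pvNE row_h1),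
          (PySem.List.pyRange 0 p).all (pvOkC row_h row_h1), false, (0 : Int) + 0) p
        = (true, (PySem.List.pyRange 0 p).any (pvNE row_h1) || pvNE row_h1 p,
           ((PySem.List.pyRange 0 p).all (pvOkC row_h row_h1) && pvHeaderCell (pvCell row_h p))
             && (!(pvNE row_h1 p) || pvHeaderCell (pvCell row_h1 p)),
           false,
           ((PySem.List.pyRange p (p + 1)).countP (pvNE row_h1) : Int)) := by
      simp only [pvStepB]
      rw [show (!(pvCell row_h p == "")) = pvNE row_h p from rfl, hPp]
      simp only [if_true]
      rw [show (!(pvCell row_h1 p == "")) = pvNE row_h1 p from rfl]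
      rw [PySem.List.pyRange_one_singleton, List.countP_cons, List.countP_nil]
      by_cases hLp : pvNE row_h1 p = true
      · rw [hLp]; simp
      · rw [Bool.not_eq_true] at hLp
        rw [hLp]; simp
    have hfold2 : (PySem.List.pyRange 0 maxc).foldl (pvStepB row_h row_h1)
        (false, false, true, false, (0 : Int))
        = (true,
           ((PySem.List.pyRange 0 p).any (pvNE row_h1) || pvNE row_h1 p)
             || (PySem.List.pyRange (p + 1) maxc).any (pvNE row_h1),
           (((PySem.List.pyRange 0 p).all (pvOkC row_h row_h1) && pvHeaderCell (pvCell row_h p))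
             && (!(pvNE row_h1 p) || pvHeaderCell (pvCell row_h1 p)))
             && (PySem.List.pyRange (p + 1) maxc).all (pvOkC row_h row_h1),
           fd', cnt') := by
      rw [PySem.List.pyRange_one_append 0 p maxc hap (by omega),
        PySem.List.pyRange_one_cons hpm]
      rw [List.foldl_append, List.foldl_cons]
      rw [pvNoPar row_h row_h1 0 p hnp false false true false 0]
      simp only [Bool.false_eq_true, if_false, Bool.false_or, Bool.true_and]
      rw [hstep, hfold]
    rw [hfold2]
    -- components of the canonical form
    have hany : (PySem.List.pyRange 0 maxc).any (pvNE row_h1)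
        = (((PySem.List.pyRange 0 p).any (pvNE row_h1) || pvNE row_h1 p)
            || (PySem.List.pyRange (p + 1) maxc).any (pvNE row_h1)) := by
      rw [PySem.List.pyRange_one_append 0 p maxc hap (by omega),
        PySem.List.pyRange_one_cons hpm, List.any_append, List.any_cons, Bool.or_assoc]
    have hall : (PySem.List.pyRange 0 maxc).all (pvOkC row_h row_h1)
        = ((((PySem.List.pyRange 0 p).all (pvOkC row_h row_h1) && pvHeaderCell (pvCell row_h p))
            && (!(pvNE row_h1 p) || pvHeaderCell (pvCell row_h1 p)))
            && (PySem.List.pyRange (p + 1) maxc).all (pvOkC row_h row_h1)) := by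
      rw [PySem.List.pyRange_one_append 0 p maxc hap (by omega),
        PySem.List.pyRange_one_cons hpm, List.all_append, List.all_cons]
      have hokp : pvOkC row_h row_h1 p
          = (pvHeaderCell (pvCell row_h p) && (!(pvNE row_h1 p) || pvHeaderCell (pvCell row_h1 p))) := by
        simp [pvOkC, hPp]
      rw [hokp]
      cases (PySem.List.pyRange 0 p).all (pvOkC row_h row_h1) <;>
        cases pvHeaderCell (pvCell row_h p) <;> simp
    have hls : ((PySem.List.pyRange 0 maxc).filter (pvNE row_h1)).isEmpty
        = !((PySem.List.pyRange 0 maxc).any (pvNE row_h1)) := by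
      rw [pv_any_filter_empty]
      simp
    simp only []
    rw [← hany, ← hall]
    rw [Bool.false_or] at hcomb
    simp only [Bool.true_and]
    rw [hcomb, hls]
    simp

-- ===== VERDICT (by name: the statement is the Claim_ definition above) =====
theorem looks_like_sub_header_py_spec : Claim_equal_looks_like_sub_header_py := by
  intro row_h row_h1 _
  unfold Spec_looks_like_sub_header_py
  rw [pvA_eq_canon, pvB_eq_canon]
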